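-- pv_equiv track=rewrite | github.com/deyna256/codeforces-rag | parser/benchmarks/editorial_finder/runner.py | _is_result_correct
-- ===== SOURCE A (Python) =====
-- def _is_result_correct(expected: list[str], found: list[str]) -> bool:
--     """
--     Check if found editorial matches expected.
--
--     Args:
--         expected: Expected editorial URLs (empty list if no editorial exists)
--         found: Found editorial URLs
--
--     Returns:
--         True if correct
--     """
--     # Case 1: No editorial expected and none found
--     if len(expected) == 0 and len(found) == 0:
--         return True
--
--     # Case 2: Editorial expected but none found
--     if len(expected) > 0 and len(found) == 0:
--         return False
--
--     # Case 3: No editorial expected but some found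
--     if len(expected) == 0 and len(found) > 0:
--         return False
--
--     # Case 4: Editorial expected and found - check if there's at least one match
--     if len(expected) > 0 and len(found) > 0:
--         # Normalize URLs for comparison (remove trailing slashes, etc.)
--         expected_normalized = {url.rstrip("/").lower() for url in expected}
--         found_normalized = {url.rstrip("/").lower() for url in found}
--
--         # Check if there's any intersection
--         return len(expected_normalized & found_normalized) > 0
--
--     return False
-- ===== SOURCE B (Python) =====
-- def _is_result_correct(expected: list[str], found: list[str]) -> bool:
--     """Quadratic pairwise scan: any normalized expected/found pair equal; both-empty is True."""
--     for e in expected: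
--         ne = e.rstrip("/").lower()
--         for f in found:
--             if ne == f.rstrip("/").lower():
--                 return True
--     return len(expected) == 0 and len(found) == 0
-- ===== Notes on version B (the rewrite author's own statement) =====
-- stated objective: alternative
-- what changed: Replaced the four-branch length cascade plus two set comprehensions and a hashed set intersection by a single nested pairwise loop over expected and found comparing normalized URLs, returning at the first match, with a both-empty fall-through.
import Mathlib
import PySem

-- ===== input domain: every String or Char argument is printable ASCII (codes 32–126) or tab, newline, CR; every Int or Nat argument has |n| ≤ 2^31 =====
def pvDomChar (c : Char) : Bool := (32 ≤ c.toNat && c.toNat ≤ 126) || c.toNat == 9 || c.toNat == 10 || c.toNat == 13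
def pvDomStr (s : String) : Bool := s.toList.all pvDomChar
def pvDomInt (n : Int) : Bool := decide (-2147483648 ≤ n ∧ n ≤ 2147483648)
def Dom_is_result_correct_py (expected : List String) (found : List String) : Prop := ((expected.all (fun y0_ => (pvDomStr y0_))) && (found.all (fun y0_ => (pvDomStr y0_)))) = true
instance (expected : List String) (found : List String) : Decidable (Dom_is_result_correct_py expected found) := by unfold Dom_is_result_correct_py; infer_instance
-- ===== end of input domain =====

-- B replaces A's length cascade + set intersection with a nested pairwise scan over
-- normalized URLs (alternative decomposition, same results).


-- Python's s.rstrip("/"): drop trailing '/' characters (hand port, exact: PySem.rstrip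
-- strips whitespace, not a given character set).
def rstripSlash (s : String) : String :=
  String.ofList ((s.toList.reverse.dropWhile (fun c => c == '/')).reverse)

-- url.rstrip("/").lower(), the normalization both Pythons apply
def normUrl (s : String) : String := PySem.Str.lower (rstripSlash s)

-- ===== PORT A =====
def is_result_correct_py (expected : List String) (found : List String) : Bool :=
  if expected.length == 0 && found.length == 0 then true
  else if decide (expected.length > 0) && (found.length == 0) then false
  else if (expected.length == 0) && decide (found.length > 0) then false
  else if decide (expected.length > 0) && decide (found.length > 0) then
    let expected_normalized : PySem.Set String := PySem.Set.ofList (expected.map normUrl)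
    let found_normalized : PySem.Set String := PySem.Set.ofList (found.map normUrl)
    decide (PySem.Set.len (PySem.Set.inter expected_normalized found_normalized) > 0)
  else false

-- ===== PORT B =====
def is_result_correct_py_alt (expected : List String) (found : List String) : Bool :=
  if expected.any (fun e => found.any (fun f => normUrl e == normUrl f)) then true
  else (expected.length == 0) && (found.length == 0)

-- ===== PRECONDITION & SPEC =====
def Spec_is_result_correct_py (expected : List String) (found : List String) (out : Bool) : Prop := out = is_result_correct_py_alt expected found
instance (expected : List String) (found : List String) (out : Bool) : Decidable (Spec_is_result_correct_py expected found out) := by unfold Spec_is_result_correct_py; infer_instance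

-- ===== CLAIM (what is proved, stated in full; the proofs are below) =====
def Claim_equal_is_result_correct_py : Prop := ∀ (expected : List String) (found : List String), Dom_is_result_correct_py expected found → Spec_is_result_correct_py expected found (is_result_correct_py expected found)

-- ===== LEMMAS AND PROOFS =====

-- nonempty intersection of the normalized sets ↔ some pair normalizes equal
theorem inter_pos_iff_any (expected found : List String) :
    (0 < PySem.Set.len (PySem.Set.inter (PySem.Set.ofList (expected.map normUrl))
        (PySem.Set.ofList (found.map normUrl)))) ↔
    (expected.any (fun e => found.any (fun f => normUrl e == normUrl f)) = true) := by
  have hlen : ∀ (l : PySem.Set String), 0 < PySem.Set.len l ↔ ∃ x, x ∈ l := by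
    intro l; simp [PySem.Set.len, List.length_pos_iff_exists_mem]
  rw [hlen]
  simp only [PySem.Set.mem_inter, PySem.Set.mem_ofList, List.mem_map,
    List.any_eq_true, beq_iff_eq]
  constructor
  · rintro ⟨x, ⟨e, he, rfl⟩, f, hf, hff⟩
    exact ⟨e, he, f, hf, hff.symm⟩
  · rintro ⟨e, he, f, hf, h⟩
    exact ⟨normUrl e, ⟨e, he, rfl⟩, f, hf, h.symm⟩

-- ===== VERDICT (by name: the statement is the Claim_ definition above) =====
theorem is_result_correct_py_spec : Claim_equal_is_result_correct_py := by
  intro expected found _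
  unfold Spec_is_result_correct_py is_result_correct_py is_result_correct_py_alt
  cases expected with
  | nil =>
    cases found <;> simp
  | cons e es =>
    cases found with
    | nil => simp
    | cons f fs =>
      have h := inter_pos_iff_any (e :: es) (f :: fs)
      cases hb : ((e :: es).any fun e => (f :: fs).any fun f => normUrl e == normUrl f) with
      | true =>
          have hx := h.mpr hb
          simp only [PySem.Set.len, List.map_cons] at hx
          have hx' : 0 < List.length ((PySem.Set.ofList (normUrl e :: List.map normUrl es)).inter
              (PySem.Set.ofList (normUrl f :: List.map normUrl fs))) := by omega
          simp [hx']
      | false =>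
          have hx : ¬ (0 < PySem.Set.len (PySem.Set.inter
              (PySem.Set.ofList ((e :: es).map normUrl))
              (PySem.Set.ofList ((f :: fs).map normUrl)))) := by
            intro hp
            rw [h.mp hp] at hb
            exact Bool.noConfusion hb
          simp only [PySem.Set.len, List.map_cons] at hx
          have hx' : List.length ((PySem.Set.ofList (normUrl e :: List.map normUrl es)).inter
              (PySem.Set.ofList (normUrl f :: List.map normUrl fs))) = 0 := by omega
          simp [List.length_eq_zero_iff.mp hx']
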